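-- pv_equiv track=rewrite | github.com/huntercollegehighschool/srs-lists-f21-studentok | Program2.py | odd_reverse
-- ===== SOURCE A (Python) =====
-- def odd_reverse(lst):
--   odds = []
--   length = len(lst)
--   for i in range(length):
--     if i%2 != 0:
--       odds.append(lst[i])
--   odds.reverse()
--   return odds
-- ===== SOURCE B (Python) =====
-- def odd_reverse(lst):
--   # walk the odd indices back-to-front; no reverse step needed
--   start = len(lst) - 1 if len(lst) % 2 == 0 else len(lst) - 2
--   out = []
--   for i in range(start, 0, -2):
--     out.append(lst[i])
--   return out
-- ===== Notes on version B (the rewrite author's own statement) =====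
-- stated objective: alternative
-- what changed: B computes the last odd index and walks it down to 1 with step -2, emitting elements directly in final order, instead of A's forward filter pass followed by an in-place reverse.
import Mathlib
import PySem

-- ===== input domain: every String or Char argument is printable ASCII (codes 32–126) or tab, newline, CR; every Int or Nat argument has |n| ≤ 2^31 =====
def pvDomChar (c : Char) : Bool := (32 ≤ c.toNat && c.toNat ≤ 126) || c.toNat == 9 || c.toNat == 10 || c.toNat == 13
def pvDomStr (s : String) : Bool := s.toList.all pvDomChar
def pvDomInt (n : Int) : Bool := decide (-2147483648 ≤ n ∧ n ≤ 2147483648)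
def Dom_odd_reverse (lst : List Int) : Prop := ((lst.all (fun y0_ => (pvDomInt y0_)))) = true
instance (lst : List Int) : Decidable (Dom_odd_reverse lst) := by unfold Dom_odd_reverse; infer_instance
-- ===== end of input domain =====

-- B walks the odd indices back-to-front (last odd index, step -2) instead of A's
-- forward filter pass followed by an in-place reverse; same O(n) cost, different decomposition.

-- ===== PORT A =====
def odd_reverse (lst : List Int) : List Int :=
  let odds : List Int :=
    (PySem.List.pyRange 0 (lst.length : Int) 1).foldl
      (fun acc i => if PySem.Int.mod i 2 ≠ 0 then acc ++ [PySem.List.pyGetD lst i 0] else acc) []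
  odds.reverse

-- ===== PORT B =====
def odd_reverse_alt (lst : List Int) : List Int :=
  let n : Int := (lst.length : Int)
  let start : Int := if PySem.Int.mod n 2 = 0 then n - 1 else n - 2
  (PySem.List.pyRange start 0 (-2)).foldl
    (fun acc i => acc ++ [PySem.List.pyGetD lst i 0]) []

-- ===== PRECONDITION & SPEC =====
def Spec_odd_reverse (lst : List Int) (out : List Int) : Prop := out = odd_reverse_alt lst
instance (lst : List Int) (out : List Int) : Decidable (Spec_odd_reverse lst out) := by unfold Spec_odd_reverse; infer_instance

-- ===== CLAIM (what is proved, stated in full; the proofs are below) =====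
def Claim_equal_odd_reverse : Prop := ∀ (lst : List Int), Dom_odd_reverse lst → Spec_odd_reverse lst (odd_reverse lst)

-- ===== LEMMAS AND PROOFS =====

-- range(a, b, -2) peels its head, like range(a, b, -1) does
theorem pyRange_neg_two_cons (a b : Int) (h : b < a) :
    PySem.List.pyRange a b (-2) = a :: PySem.List.pyRange (a - 2) b (-2) := by
  unfold PySem.List.pyRange
  have h2 : ¬ (0 : Int) < -2 := by decide
  have e2 : (- -2 : Int) = 2 := by norm_num
  by_cases hb : b < a - 2
  · simp only [if_neg (by decide : ¬ (-2 : Int) = 0), if_neg h2, if_pos h, if_pos hb, e2]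
    have hcnt : ((a - b + 2 - 1) / 2) = ((a - 2 - b + 2 - 1) / 2) + 1 := by omega
    rw [hcnt]
    have hnn : 0 ≤ (a - 2 - b + 2 - 1) / 2 := Int.ediv_nonneg (by omega) (by norm_num)
    rw [Int.toNat_add hnn (by norm_num), Int.toNat_one, List.range_succ_eq_map]
    simp [List.map_map, Function.comp_def, mul_add]
    ring_nf
    exact fun _ _ => trivial
  · have hcnt : ((a - b + 2 - 1) / 2).toNat = 1 := by omega
    simp only [if_neg (by decide : ¬ (-2 : Int) = 0), if_neg h2, if_pos h, if_neg hb, e2]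
    rw [hcnt]
    simp

-- the countdown over odd indices is the reversed forward filter of the odd indices
theorem countdown_eq_filter_reverse (n : Nat) :
    PySem.List.pyRange
        (if PySem.Int.mod (n : Int) 2 = 0 then (n : Int) - 1 else (n : Int) - 2) 0 (-2)
      = ((PySem.List.pyRange 0 (n : Int) 1).filter
          (fun i => decide (PySem.Int.mod i 2 ≠ 0))).reverse := by
  induction n with
  | zero =>
    simp [PySem.List.pyRange]
  | succ n ih =>
    have hmod : ∀ m : Nat, PySem.Int.mod (m : Int) 2 = ((m % 2 : Nat) : Int) := fun m =>
      PySem.Int.mod_natCast m 2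
    have hsplit : PySem.List.pyRange 0 ((n : Int) + 1) 1
        = PySem.List.pyRange 0 (n : Int) 1 ++ [(n : Int)] :=
      PySem.List.pyRange_one_succ_right (by positivity)
    push_cast
    rw [hsplit, List.filter_append, List.reverse_append]
    by_cases hpar : n % 2 = 0
    · -- new index n is even: filter unchanged; start unchanged (n even means n+1 odd)
      have h1 : PySem.Int.mod ((n : Int) + 1) 2 ≠ 0 := by
        have hm := hmod (n + 1); push_cast at hm; rw [hm]; omega
      have h2 : PySem.Int.mod (n : Int) 2 = 0 := by rw [hmod, hpar]; rfl
      rw [if_neg h1]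
      have hfe : (List.filter (fun i => decide (PySem.Int.mod i 2 ≠ 0)) [(n : Int)]) = [] := by
        simp; omega
      rw [hfe, List.reverse_nil, List.nil_append,
        show (n : Int) + 1 - 2 = (n : Int) - 1 from by ring]
      rw [if_pos h2] at ih
      exact ih
    · -- new index n is odd: it is prepended on the right side and peeled on the left
      have h1 : PySem.Int.mod ((n : Int) + 1) 2 = 0 := by
        have hm := hmod (n + 1); push_cast at hm; rw [hm]; omega
      have h2 : PySem.Int.mod (n : Int) 2 ≠ 0 := by rw [hmod]; omega
      rw [if_pos h1]
      have hfe : (List.filter (fun i => decide (PySem.Int.mod i 2 ≠ 0)) [(n : Int)])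
          = [(n : Int)] := by simp; omega
      rw [hfe, List.reverse_singleton,
        show (n : Int) + 1 - 1 = (n : Int) from by ring,
        pyRange_neg_two_cons _ _ (by omega : (0 : Int) < (n : Int))]
      rw [if_neg h2] at ih
      rw [ih, List.singleton_append]

-- ===== VERDICT (by name: the statement is the Claim_ definition above) =====
theorem odd_reverse_spec : Claim_equal_odd_reverse := by
  intro lst _
  unfold Spec_odd_reverse odd_reverse odd_reverse_alt
  rw [PySem.List.foldl_append_ite (fun i => PySem.Int.mod i 2 ≠ 0)
        (fun i => PySem.List.pyGetD lst i 0),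
      PySem.List.foldl_append_singleton_eq_map,
      countdown_eq_filter_reverse lst.length]
  simp [List.map_reverse]
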